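-- pv_equiv track=rewrite | github.com/FloydHsiu/LabelProcessing | LabelProcessing/TransmitLabel.py | seg2bbox_lefttop
-- ===== SOURCE A (Python) =====
-- def seg2bbox_lefttop(seg):
--     # transmit a segmentation label into bounding box label
--     # input:
--     #    seg: list([xi, yi])
--     # output:
--     #    bbox_lefttop: [x, y, w, h]
--     if not(len(seg) >= 1):
--         return False
--     x_left, x_right = seg[0][0], seg[0][0]
--     y_top, y_bottom = seg[0][1], seg[0][1]
--     for i in range(1, len(seg)):
--         x, y = seg[i][0], seg[i][1]
--         # compare x boundary
--         if x < x_left: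
--             x_left = x
--         elif x > x_right:
--             x_right = x
--         else:
--             pass
--         # compare y boundary
--         if y < y_top:
--             y_top = y
--         elif y > y_bottom:
--             y_bottom = y
--         else:
--             pass
--     return [x_left, y_top, x_right - x_left, y_bottom - y_top]
-- ===== SOURCE B (Python) =====
-- def seg2bbox_lefttop(seg):
--     # Bounding box from segmentation points, via four separate min/max reductions
--     # instead of a single multi-accumulator scan.
--     if len(seg) < 1:
--         return False
--     xs = [p[0] for p in seg]
--     ys = [p[1] for p in seg]
--     x_left, x_right = min(xs), max(xs)
--     y_top, y_bottom = min(ys), max(ys)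
--     return [x_left, y_top, x_right - x_left, y_bottom - y_top]
-- ===== Notes on version B (the rewrite author's own statement) =====
-- stated objective: idiomatic
-- what changed: Replaced the single-pass four-accumulator comparison loop with projection lists and four builtin min/max reductions.
-- outside the precondition, e.g. on seg2bbox_lefttop([]): A returns False, B returns False
import Mathlib
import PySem

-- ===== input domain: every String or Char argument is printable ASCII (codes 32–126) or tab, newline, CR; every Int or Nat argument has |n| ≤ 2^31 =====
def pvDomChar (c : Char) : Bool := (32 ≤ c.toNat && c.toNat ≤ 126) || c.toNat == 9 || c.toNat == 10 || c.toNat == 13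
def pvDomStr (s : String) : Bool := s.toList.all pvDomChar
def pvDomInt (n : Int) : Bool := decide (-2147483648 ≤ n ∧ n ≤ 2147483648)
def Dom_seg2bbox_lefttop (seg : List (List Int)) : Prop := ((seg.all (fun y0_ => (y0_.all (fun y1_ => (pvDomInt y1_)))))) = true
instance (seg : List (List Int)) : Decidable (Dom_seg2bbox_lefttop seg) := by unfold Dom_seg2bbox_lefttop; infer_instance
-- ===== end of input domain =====

-- B computes the bbox via four separate min/max reductions over projection lists
-- instead of A's single four-accumulator comparison loop (objective: idiomatic).
-- A's 'return False' (empty input) is ported as 'none'.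

-- ===== PORT A =====
-- one iteration of A's for-loop body (seg[i][0]/seg[i][1] access may raise → none)
def segStepA (st : Int × Int × Int × Int) (p : List Int) : Option (Int × Int × Int × Int) :=
  match PySem.List.pyGet? p 0, PySem.List.pyGet? p 1 with
  | some x, some y =>
      some (if x < st.1 then x else st.1,
            if x < st.1 then st.2.1 else if st.2.1 < x then x else st.2.1,
            if y < st.2.2.1 then y else st.2.2.1,
            if y < st.2.2.1 then st.2.2.2 else if st.2.2.2 < y then y else st.2.2.2)
  | _, _ => none

def seg2bbox_lefttop (seg : List (List Int)) : Option (List Int) :=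
  match seg with
  | [] => none          -- not(len(seg) >= 1): return False
  | p0 :: rest =>
    match PySem.List.pyGet? p0 0, PySem.List.pyGet? p0 1 with
    | some x0, some y0 =>
      -- for i in range(1, len(seg)) visits exactly the tail, in order
      match rest.foldlM segStepA (x0, x0, y0, y0) with
      | some (xl, xr, yt, yb) => some [xl, yt, xr - xl, yb - yt]
      | none => none
    | _, _ => none

-- ===== PORT B =====
def seg2bbox_lefttop_alt (seg : List (List Int)) : Option (List Int) :=
  if seg.length < 1 then none   -- return False
  else
    match seg.mapM (fun p => PySem.List.pyGet? p 0),
          seg.mapM (fun p => PySem.List.pyGet? p 1) with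
    | some xs, some ys =>
      match PySem.List.min? xs (fun v => v), PySem.List.max? xs (fun v => v),
            PySem.List.min? ys (fun v => v), PySem.List.max? ys (fun v => v) with
      | some xl, some xr, some yt, some yb => some [xl, yt, xr - xl, yb - yt]
      | _, _, _, _ => none
    | _, _ => none

-- ===== PRECONDITION & SPEC =====
-- Pre_ excludes the inputs where A raises IndexError (a point with fewer than 2 coordinates)
-- and the empty list, on which A returns False, a value outside the declared list return type.
def Pre_seg2bbox_lefttop (seg : List (List Int)) : Prop := seg ≠ [] ∧ ∀ p ∈ seg, 2 ≤ p.length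
instance (seg : List (List Int)) : Decidable (Pre_seg2bbox_lefttop seg) := by unfold Pre_seg2bbox_lefttop; infer_instance
def pvWitness_seg2bbox_lefttop : List (List Int) := [[1, 2], [3, -1], [0, 5]]

def Spec_seg2bbox_lefttop (seg : List (List Int)) (out : Option (List Int)) : Prop := out = seg2bbox_lefttop_alt seg
instance (seg : List (List Int)) (out : Option (List Int)) : Decidable (Spec_seg2bbox_lefttop seg out) := by unfold Spec_seg2bbox_lefttop; infer_instance

-- ===== CLAIM (what is proved, stated in full; the proofs are below) =====
def Claim_equal_seg2bbox_lefttop : Prop := ∀ (seg : List (List Int)), Dom_seg2bbox_lefttop seg → Pre_seg2bbox_lefttop seg → Spec_seg2bbox_lefttop seg (seg2bbox_lefttop seg)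

-- ===== LEMMAS AND PROOFS =====

-- projections (= p[0], p[1] for points of length ≥ 2)
def fx (p : List Int) : Int := p.headD 0
def fy (p : List Int) : Int := (p.drop 1).headD 0

-- pure version of A's loop body for points of length ≥ 2
def stepP (st : Int × Int × Int × Int) (p : List Int) : Int × Int × Int × Int :=
  (if fx p < st.1 then fx p else st.1,
   if fx p < st.1 then st.2.1 else if st.2.1 < fx p then fx p else st.2.1,
   if fy p < st.2.2.1 then fy p else st.2.2.1,
   if fy p < st.2.2.1 then st.2.2.2 else if st.2.2.2 < fy p then fy p else st.2.2.2)

lemma long_point (p : List Int) (hp : 2 ≤ p.length) : ∃ a b t, p = a :: b :: t := by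
  match p, hp with
  | a :: b :: t, _ => exact ⟨a, b, t, rfl⟩

lemma get0_eq (a b : Int) (t : List Int) : PySem.List.pyGet? (a :: b :: t) 0 = some a :=
  PySem.List.pyGet?_zero_cons a (b :: t)

lemma get1_eq (a b : Int) (t : List Int) : PySem.List.pyGet? (a :: b :: t) 1 = some b := by
  simp

lemma mapM_get0 (l : List (List Int)) (h : ∀ p ∈ l, 2 ≤ p.length) :
    l.mapM (fun p => PySem.List.pyGet? p 0) = some (l.map fx) := by
  induction l with
  | nil => rfl
  | cons p t ih =>
    obtain ⟨a, b, t', rfl⟩ := long_point p (h p (by simp))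
    simp [List.mapM_cons, ih (fun q hq => h q (by simp [hq])), fx]

lemma mapM_get1 (l : List (List Int)) (h : ∀ p ∈ l, 2 ≤ p.length) :
    l.mapM (fun p => PySem.List.pyGet? p 1) = some (l.map fy) := by
  induction l with
  | nil => rfl
  | cons p t ih =>
    obtain ⟨a, b, t', rfl⟩ := long_point p (h p (by simp))
    simp [List.mapM_cons, ih (fun q hq => h q (by simp [hq])), fy]

lemma foldlM_eq (l : List (List Int)) (h : ∀ p ∈ l, 2 ≤ p.length)
    (st : Int × Int × Int × Int) :
    l.foldlM segStepA st = some (l.foldl stepP st) := by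
  induction l generalizing st with
  | nil => rfl
  | cons p t ih =>
    obtain ⟨a, b, t', rfl⟩ := long_point p (h p (by simp))
    have hstep : segStepA st (a :: b :: t') = some (stepP st (a :: b :: t')) := by
      simp [segStepA, stepP, fx, fy]
    simp [List.foldlM_cons, hstep, ih (fun q hq => h q (by simp [hq]))]

lemma minA (a x : Int) : (if x < a then x else a) = min a x := by split <;> omega

lemma maxA (a b x : Int) (hab : a ≤ b) :
    (if x < a then b else if b < x then x else b) = max b x := by
  split
  · omega
  · split <;> omega

lemma stepP_foldl (l : List (List Int)) (xl xr yt yb : Int) (hx : xl ≤ xr) (hy : yt ≤ yb) :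
    l.foldl stepP (xl, xr, yt, yb) =
      (l.foldl (fun a p => min a (fx p)) xl,
       l.foldl (fun a p => max a (fx p)) xr,
       l.foldl (fun a p => min a (fy p)) yt,
       l.foldl (fun a p => max a (fy p)) yb) := by
  induction l generalizing xl xr yt yb with
  | nil => rfl
  | cons p t ih =>
    have hstep : stepP (xl, xr, yt, yb) p =
        (min xl (fx p), max xr (fx p), min yt (fy p), max yb (fy p)) := by
      unfold stepP
      rw [minA, maxA _ _ _ hx, minA, maxA _ _ _ hy]
    simp only [List.foldl_cons, hstep]
    exact ih _ _ _ _ (by omega) (by omega)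

-- ===== VERDICT (by name: the statement is the Claim_ definition above) =====
theorem seg2bbox_lefttop_spec : Claim_equal_seg2bbox_lefttop := by
  intro seg _ hpre
  unfold Spec_seg2bbox_lefttop
  match seg with
  | [] => exact absurd rfl hpre.1
  | p0 :: rest =>
    obtain ⟨x0, y0, t0, rfl⟩ := long_point p0 (hpre.2 p0 (by simp))
    have hrest : ∀ p ∈ rest, 2 ≤ p.length := fun q hq => hpre.2 q (by simp [hq])
    have hall : ∀ p ∈ (x0 :: y0 :: t0) :: rest, 2 ≤ p.length := hpre.2
    -- A side
    simp only [seg2bbox_lefttop, get0_eq, get1_eq, foldlM_eq rest hrest,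
        stepP_foldl rest x0 x0 y0 y0 le_rfl le_rfl]
    -- B side
    rw [seg2bbox_lefttop_alt]
    rw [if_neg (by simp)]
    rw [mapM_get0 _ hall, mapM_get1 _ hall]
    simp only [List.map_cons, fx, fy, List.headD_cons, List.drop_succ_cons, List.drop_zero]
    rw [PySem.List.min?_id_cons, PySem.List.max?_id_cons,
        PySem.List.min?_id_cons, PySem.List.max?_id_cons]
    simp [List.foldl_map, fx, fy]
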